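-- pv_equiv track=rewrite | github.com/SantinoVicentini/LearningPython-utdt-exercises | clase2/tuplas.py | formosa
-- ===== SOURCE A (Python) =====
-- from typing import List, Dict, Tuple, Set
--
-- def formosa(localidad1:List[tuple[str, int, int]], localidad2:List[tuple[str, int, int]]) -> List[str]:
--     nombresaprobados:set[str] = set()
--     nombresaprobados2:set[str] = set()
--     i:int = 0
--     j:int = 0
--     while i < len(localidad1):
--         if localidad1[i][2] > 80:
--             nombresaprobados.add(localidad1[i][0])
--         i+=1
--     while j < len(localidad2):
--         if localidad2[j][2] > 80:
--             nombresaprobados2.add(localidad2[j][0])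
--         j+=1
--     union:set[str] = nombresaprobados & nombresaprobados2
--     ordenadoAlfabeticamente:set[str] = sorted(union)
--     vr:List[str] = list(ordenadoAlfabeticamente)
--     return vr
-- ===== SOURCE B (Python) =====
-- def formosa(localidad1, localidad2):
--     # sort-merge intersection: no hash sets; sort the passing names of each town,
--     # drop adjacent duplicates, then intersect with a two-pointer merge.
--     xs = _uniq(sorted(t[0] for t in localidad1 if t[2] > 80))
--     ys = _uniq(sorted(t[0] for t in localidad2 if t[2] > 80))
--     out = []
--     i = 0
--     j = 0
--     while i < len(xs) and j < len(ys):
--         if xs[i] < ys[j]: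
--             i += 1
--         elif ys[j] < xs[i]:
--             j += 1
--         else:
--             out.append(xs[i])
--             i += 1
--             j += 1
--     return out
--
--
-- def _uniq(l):
--     # l is sorted: keep one copy of each adjacent run
--     out = []
--     for x in l:
--         if not out or out[-1] != x:
--             out.append(x)
--     return out
-- ===== Notes on version B (the rewrite author's own statement) =====
-- stated objective: alternative
-- what changed: B replaces A's two hash-set builds and set intersection by a sort-merge: sort each town's passing names, drop adjacent duplicates, and intersect the two sorted lists with a two-pointer merge, producing the sorted result directly with no set operations.
import Mathlib
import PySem

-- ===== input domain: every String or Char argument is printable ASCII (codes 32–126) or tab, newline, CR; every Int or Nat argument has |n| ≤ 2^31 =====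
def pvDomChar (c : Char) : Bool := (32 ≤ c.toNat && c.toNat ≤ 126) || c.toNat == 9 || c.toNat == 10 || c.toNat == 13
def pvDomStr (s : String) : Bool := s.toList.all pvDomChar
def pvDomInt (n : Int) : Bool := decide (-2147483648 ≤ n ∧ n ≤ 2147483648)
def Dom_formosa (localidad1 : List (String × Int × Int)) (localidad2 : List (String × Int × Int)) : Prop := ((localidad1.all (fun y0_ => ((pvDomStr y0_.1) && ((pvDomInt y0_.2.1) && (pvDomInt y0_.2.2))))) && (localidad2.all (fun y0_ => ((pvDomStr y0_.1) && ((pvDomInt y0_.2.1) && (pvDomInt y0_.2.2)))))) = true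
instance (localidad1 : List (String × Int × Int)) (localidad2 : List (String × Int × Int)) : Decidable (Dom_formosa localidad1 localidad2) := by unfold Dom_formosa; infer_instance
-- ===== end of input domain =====

-- B replaces A's hash-set build-and-intersect by a sort-merge: sorted+uniq'd name lists intersected by a two-pointer merge; objective: alternative.


-- ===== PORT A =====
-- the two index-driven while loops each add the name of every entry with score > 80 to a set
def formosa (localidad1 : List (String × Int × Int)) (localidad2 : List (String × Int × Int)) : List String :=
  let nombresaprobados : PySem.Set String :=
    localidad1.foldl (fun s t => if t.2.2 > 80 then PySem.Set.add s t.1 else s) PySem.Set.empty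
  let nombresaprobados2 : PySem.Set String :=
    localidad2.foldl (fun s t => if t.2.2 > 80 then PySem.Set.add s t.1 else s) PySem.Set.empty
  let union : PySem.Set String := PySem.Set.inter nombresaprobados nombresaprobados2
  PySem.List.sorted union (fun x => x) false

-- ===== PORT B =====
-- _uniq: the for-loop appending x unless it equals the last appended element
def pvUniq (l : List String) : List String :=
  l.foldl (fun out x => if out = [] ∨ out.getLast? ≠ some x then out ++ [x] else out) []

-- the two-pointer while loop over indices i, j (fuel = a loop-iteration bound, only to make the loop structural)
def pvMerge (fuel : Nat) (xs ys : List String) (i j : Nat) (out : List String) : List String :=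
  match fuel with
  | 0 => out
  | fuel + 1 =>
    if h : i < xs.length ∧ j < ys.length then
      if xs[i] < ys[j] then pvMerge fuel xs ys (i+1) j out
      else if ys[j] < xs[i] then pvMerge fuel xs ys i (j+1) out
      else pvMerge fuel xs ys (i+1) (j+1) (out ++ [xs[i]])
    else out

def formosa_alt (localidad1 : List (String × Int × Int)) (localidad2 : List (String × Int × Int)) : List String :=
  let xs : List String :=
    pvUniq (PySem.List.sorted ((localidad1.filter (fun t => t.2.2 > 80)).map Prod.fst) (fun x => x) false)
  let ys : List String :=
    pvUniq (PySem.List.sorted ((localidad2.filter (fun t => t.2.2 > 80)).map Prod.fst) (fun x => x) false)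
  pvMerge (xs.length + ys.length) xs ys 0 0 []

-- ===== PRECONDITION & SPEC =====
def Spec_formosa (localidad1 : List (String × Int × Int)) (localidad2 : List (String × Int × Int)) (out : List String) : Prop := out = formosa_alt localidad1 localidad2
instance (localidad1 : List (String × Int × Int)) (localidad2 : List (String × Int × Int)) (out : List String) : Decidable (Spec_formosa localidad1 localidad2 out) := by unfold Spec_formosa; infer_instance

-- ===== CLAIM (what is proved, stated in full; the proofs are below) =====
def Claim_equal_formosa : Prop := ∀ (localidad1 : List (String × Int × Int)) (localidad2 : List (String × Int × Int)), Dom_formosa localidad1 localidad2 → Spec_formosa localidad1 localidad2 (formosa localidad1 localidad2)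

-- ===== LEMMAS AND PROOFS =====

-- membership in A's conditional-add fold
theorem mem_addFold (l : List (String × Int × Int)) (acc : PySem.Set String) (y : String) :
    (y ∈ l.foldl (fun s t => if t.2.2 > 80 then PySem.Set.add s t.1 else s) acc) ↔
      y ∈ acc ∨ ∃ t ∈ l, t.2.2 > 80 ∧ t.1 = y := by
  induction l generalizing acc with
  | nil => simp
  | cons h t ih =>
    simp only [List.foldl_cons, ih, List.mem_cons]
    split_ifs with hp
    · rw [PySem.Set.mem_add]
      constructor
      · rintro (⟨hy | hy⟩ | ⟨u, hu, hpu, hfu⟩)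
        · exact Or.inl hy
        · exact Or.inr ⟨h, Or.inl rfl, hp, hy.symm⟩
        · exact Or.inr ⟨u, Or.inr hu, hpu, hfu⟩
      · rintro (hy | ⟨u, (rfl | hu), hpu, hfu⟩)
        · exact Or.inl (Or.inl hy)
        · exact Or.inl (Or.inr hfu.symm)
        · exact Or.inr ⟨u, hu, hpu, hfu⟩
    · constructor
      · rintro (hy | ⟨u, hu, hpu, hfu⟩)
        · exact Or.inl hy
        · exact Or.inr ⟨u, Or.inr hu, hpu, hfu⟩
      · rintro (hy | ⟨u, (rfl | hu), hpu, hfu⟩)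
        · exact Or.inl hy
        · exact absurd hpu hp
        · exact Or.inr ⟨u, hu, hpu, hfu⟩

theorem nodup_addFold (l : List (String × Int × Int)) (acc : PySem.Set String) (hacc : acc.Nodup) :
    (l.foldl (fun s t => if t.2.2 > 80 then PySem.Set.add s t.1 else s) acc).Nodup := by
  induction l generalizing acc with
  | nil => exact hacc
  | cons h t ih =>
    simp only [List.foldl_cons]
    split_ifs with hp
    · exact ih _ (PySem.Set.nodup_add _ _ hacc)
    · exact ih _ hacc

-- every element of a ≤-sorted list is ≤ its last element
theorem le_getLast_of_pairwise (out : List String) (h : out.Pairwise (· ≤ ·))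
    (b v : String) (hb : b ∈ out) (hv : out.getLast? = some v) : b ≤ v := by
  induction out with
  | nil => cases hb
  | cons c rest ih =>
    cases rest with
    | nil =>
      simp at hv hb; subst hv; simp [hb]
    | cons d rest' =>
      rw [List.getLast?_cons_cons] at hv
      rcases List.mem_cons.mp hb with rfl | hb'
      · have hv' := List.mem_of_getLast? hv
        exact (List.pairwise_cons.mp h).1 v hv'
      · exact ih (List.pairwise_cons.mp h).2 hb' hv

-- characterisation of the uniq fold on a ≤-sorted input
theorem uniq_aux (l : List String) (out : List String)
    (hl : l.Pairwise (· ≤ ·)) (hout : out.Pairwise (· < ·))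
    (hbd : ∀ b ∈ out, ∀ a ∈ l, b ≤ a) :
    (l.foldl (fun out x => if out = [] ∨ out.getLast? ≠ some x then out ++ [x] else out) out).Pairwise (· < ·) ∧
      ∀ a, a ∈ l.foldl (fun out x => if out = [] ∨ out.getLast? ≠ some x then out ++ [x] else out) out ↔
        a ∈ out ∨ a ∈ l := by
  induction l generalizing out with
  | nil => exact ⟨hout, fun a => by simp⟩
  | cons x rest ih =>
    simp only [List.foldl_cons]
    have hxrest : ∀ a ∈ rest, x ≤ a := fun a ha => (List.pairwise_cons.mp hl).1 a ha
    by_cases hc : out = [] ∨ out.getLast? ≠ some x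
    · rw [if_pos hc]
      have hblt : ∀ b ∈ out, b < x := by
        intro b hb
        have hne : out ≠ [] := fun hn => by subst hn; cases hb
        have hsome : out.getLast? ≠ none := by
          simpa [List.getLast?_eq_none_iff] using hne
        obtain ⟨v, hv⟩ := Option.ne_none_iff_exists'.mp hsome
        have hbv : b ≤ v := le_getLast_of_pairwise out (hout.imp (fun h => le_of_lt h)) b v hb hv
        have hvx : v ≤ x := hbd v (List.mem_of_getLast? hv) x (List.mem_cons_self ..)
        have hvnex : v ≠ x := by
          rcases hc with hc | hc
          · exact absurd hc hne
          · intro he; exact hc (he ▸ hv)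
        exact lt_of_le_of_lt hbv (lt_of_le_of_ne hvx hvnex)
      have hout' : (out ++ [x]).Pairwise (· < ·) := by
        rw [List.pairwise_append]
        refine ⟨hout, List.pairwise_singleton _ _, fun b hb y hy => ?_⟩
        have : y = x := List.mem_singleton.mp hy
        subst this
        exact hblt b hb
      have hbd' : ∀ b ∈ out ++ [x], ∀ a ∈ rest, b ≤ a := by
        intro b hb a ha
        rcases List.mem_append.mp hb with hb | hb
        · exact hbd b hb a (List.mem_cons_of_mem _ ha)
        · have : b = x := List.mem_singleton.mp hb
          subst this
          exact hxrest a ha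
      obtain ⟨h1, h2⟩ := ih (out ++ [x]) (List.pairwise_cons.mp hl).2 hout' hbd'
      refine ⟨h1, fun a => ?_⟩
      rw [h2 a]
      simp only [List.mem_append, List.mem_cons, List.not_mem_nil, or_false]
      tauto
    · rw [if_neg hc]
      rw [not_or, not_not] at hc
      have hxout : x ∈ out := List.mem_of_getLast? hc.2
      obtain ⟨h1, h2⟩ := ih out (List.pairwise_cons.mp hl).2 hout
        (fun b hb a ha => hbd b hb a (List.mem_cons_of_mem _ ha))
      refine ⟨h1, fun a => ?_⟩
      rw [h2 a, List.mem_cons]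
      constructor
      · tauto
      · rintro (h | rfl | h)
        · exact Or.inl h
        · exact Or.inl hxout
        · exact Or.inr h

theorem pvUniq_spec (l : List String) (hl : l.Pairwise (· ≤ ·)) :
    (pvUniq l).Pairwise (· < ·) ∧ ∀ a, a ∈ pvUniq l ↔ a ∈ l := by
  have := uniq_aux l [] hl (List.Pairwise.nil) (by simp)
  simpa [pvUniq] using this

-- the structural form of the two-pointer merge
def pvInterRec : List String → List String → List String
  | [], _ => []
  | _ :: _, [] => []
  | x :: xs, y :: ys =>
    if x < y then pvInterRec xs (y :: ys)
    else if y < x then pvInterRec (x :: xs) ys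
    else x :: pvInterRec xs ys

theorem pvInterRec_nil_left (ys : List String) : pvInterRec [] ys = [] := by
  rw [pvInterRec.eq_def]

theorem pvInterRec_nil_right (x : String) (xs : List String) : pvInterRec (x :: xs) [] = [] := by
  rw [pvInterRec.eq_def]

theorem pvInterRec_cons_cons (x y : String) (xs ys : List String) :
    pvInterRec (x :: xs) (y :: ys) =
      if x < y then pvInterRec xs (y :: ys)
      else if y < x then pvInterRec (x :: xs) ys
      else x :: pvInterRec xs ys := by
  rw [pvInterRec.eq_def]

theorem pvMerge_eq_aux (fuel : Nat) : ∀ (xs ys : List String) (i j : Nat) (out : List String),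
    xs.length - i + (ys.length - j) ≤ fuel →
    pvMerge fuel xs ys i j out = out ++ pvInterRec (xs.drop i) (ys.drop j) := by
  induction fuel with
  | zero =>
    intro xs ys i j out hn
    have h1 : xs.length ≤ i := by omega
    have h2 : ys.length ≤ j := by omega
    rw [pvMerge, List.drop_eq_nil_of_le h1, List.drop_eq_nil_of_le h2,
      pvInterRec_nil_left, List.append_nil]
  | succ fuel ih =>
    intro xs ys i j out hn
    rw [pvMerge]
    by_cases h : i < xs.length ∧ j < ys.length
    · rw [dif_pos h]
      rw [List.drop_eq_getElem_cons h.1, List.drop_eq_getElem_cons h.2, pvInterRec_cons_cons]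
      split_ifs with h1 h2
      · rw [ih xs ys (i+1) j out (by omega), ← List.drop_eq_getElem_cons h.2]
      · rw [ih xs ys i (j+1) out (by omega), ← List.drop_eq_getElem_cons h.1]
      · rw [ih xs ys (i+1) (j+1) (out ++ [xs[i]]) (by omega)]
        simp
    · rw [dif_neg h]
      rcases (by omega : xs.length ≤ i ∨ ys.length ≤ j) with h' | h'
      · rw [List.drop_eq_nil_of_le h']
        cases ys.drop j <;> simp [pvInterRec_nil_left]
      · rw [List.drop_eq_nil_of_le h']
        cases xs.drop i <;> simp [pvInterRec_nil_left, pvInterRec_nil_right]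

theorem pvMerge_eq (xs ys : List String) :
    pvMerge (xs.length + ys.length) xs ys 0 0 [] = pvInterRec xs ys := by
  rw [pvMerge_eq_aux (xs.length + ys.length) xs ys 0 0 [] (by omega), List.drop_zero,
    List.drop_zero, List.nil_append]

theorem pvInterRec_sublist (xs ys : List String) : (pvInterRec xs ys).Sublist xs := by
  fun_induction pvInterRec xs ys with
  | case1 ys => simp
  | case2 x xs => simp
  | case3 x xs y ys hlt ih => exact ih.cons _
  | case4 x xs y ys hlt hgt ih => exact ih
  | case5 x xs y ys hlt hgt ih => exact ih.cons₂ _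

theorem pvInterRec_mem (xs ys : List String) (hxs : xs.Pairwise (· < ·))
    (hys : ys.Pairwise (· < ·)) (a : String) :
    a ∈ pvInterRec xs ys ↔ a ∈ xs ∧ a ∈ ys := by
  fun_induction pvInterRec xs ys with
  | case1 ys => simp
  | case2 x xs => simp
  | case3 x xs y ys hlt ih =>
    rw [ih (List.pairwise_cons.mp hxs).2 hys]
    simp only [List.mem_cons]
    constructor
    · rintro ⟨h1, h2⟩; exact ⟨Or.inr h1, h2⟩
    · rintro ⟨(rfl | h1), h2⟩
      · exfalso
        rcases h2 with rfl | h2'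
        · exact lt_irrefl a hlt
        · exact lt_asymm hlt ((List.pairwise_cons.mp hys).1 a h2')
      · exact ⟨h1, h2⟩
  | case4 x xs y ys hlt hgt ih =>
    rw [ih hxs (List.pairwise_cons.mp hys).2]
    simp only [List.mem_cons]
    constructor
    · rintro ⟨h1, h2⟩; exact ⟨h1, Or.inr h2⟩
    · rintro ⟨h1, (rfl | h2)⟩
      · exfalso
        rcases h1 with rfl | h1'
        · exact lt_irrefl a hgt
        · exact lt_asymm hgt ((List.pairwise_cons.mp hxs).1 a h1')
      · exact ⟨h1, h2⟩
  | case5 x xs y ys hlt hgt ih =>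
    have hxy : x = y := le_antisymm (le_of_not_gt hgt) (le_of_not_gt hlt)
    subst hxy
    simp only [List.mem_cons, ih (List.pairwise_cons.mp hxs).2 (List.pairwise_cons.mp hys).2]
    constructor
    · rintro (rfl | ⟨h1, h2⟩)
      · exact ⟨Or.inl rfl, Or.inl rfl⟩
      · exact ⟨Or.inr h1, Or.inr h2⟩
    · rintro ⟨h1 | h1, h2⟩
      · exact Or.inl h1
      · rcases h2 with rfl | h2
        · exact absurd ((List.pairwise_cons.mp hxs).1 a h1) (lt_irrefl a)
        · exact Or.inr ⟨h1, h2⟩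

-- ===== VERDICT (by name: the statement is the Claim_ definition above) =====
theorem formosa_spec : Claim_equal_formosa := by
  intro l1 l2 _
  show formosa l1 l2 = formosa_alt l1 l2
  unfold formosa formosa_alt
  simp only
  rw [pvMerge_eq]
  have hp1 : (PySem.List.sorted ((l1.filter (fun t => t.2.2 > 80)).map Prod.fst) (fun x => x) false).Pairwise (· ≤ ·) :=
    PySem.List.sorted_pairwise _ _
  have hp2 : (PySem.List.sorted ((l2.filter (fun t => t.2.2 > 80)).map Prod.fst) (fun x => x) false).Pairwise (· ≤ ·) :=
    PySem.List.sorted_pairwise _ _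
  obtain ⟨hq1, hm1⟩ := pvUniq_spec _ hp1
  obtain ⟨hq2, hm2⟩ := pvUniq_spec _ hp2
  apply PySem.List.sorted_eq_of_perm_of_pairwise_lt
  · refine (List.perm_ext_iff_of_nodup ?_ ?_).mpr ?_
    · exact ((hq1.imp (fun h => ne_of_lt h)).sublist (pvInterRec_sublist _ _))
    · exact PySem.Set.nodup_inter _ _ (nodup_addFold l1 _ List.nodup_nil)
    · intro a
      rw [pvInterRec_mem _ _ hq1 hq2, hm1, hm2, PySem.Set.mem_inter,
        mem_addFold l1 _ a, mem_addFold l2 _ a, PySem.List.mem_sorted, PySem.List.mem_sorted]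
      simp only [PySem.Set.empty, List.not_mem_nil, false_or, List.mem_map, List.mem_filter,
        decide_eq_true_eq]
      constructor
      · rintro ⟨⟨t, ⟨ht, hgt⟩, hfa⟩, ⟨u, ⟨hu, hgu⟩, hfu⟩⟩
        exact ⟨⟨t, ht, hgt, hfa⟩, ⟨u, hu, hgu, hfu⟩⟩
      · rintro ⟨⟨t, ht, hgt, hfa⟩, ⟨u, hu, hgu, hfu⟩⟩
        exact ⟨⟨t, ⟨ht, hgt⟩, hfa⟩, ⟨u, ⟨hu, hgu⟩, hfu⟩⟩
  · exact (hq1.sublist (pvInterRec_sublist _ _))
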